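-- pv_equiv track=rewrite | github.com/lucasnfe/adl-piano-midi | src/load.py | adl_stats
-- ===== SOURCE A (Python) =====
-- def adl_stats(adl_dataset):
--     current_midi_data_stats = {"Artists": 0, "Genres": 0, "Sub-Genres": 0, "Songs": 0}
--
--     for genre in adl_dataset:
--         current_midi_data_stats["Genres"] += 1
--         for subgenre in adl_dataset[genre]:
--             current_midi_data_stats["Sub-Genres"] += 1
--             for artist in adl_dataset[genre][subgenre]:
--                 current_midi_data_stats["Artists"] += 1
--                 for songs in adl_dataset[genre][subgenre][artist]:
--                     current_midi_data_stats["Songs"] += 1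
--
--     return current_midi_data_stats
-- ===== SOURCE B (Python) =====
-- def adl_stats(adl_dataset):
--     # Level-by-level flattening (BFS over the nesting): each pass flattens one
--     # level of the nested dict; the count at each depth is the length of the
--     # flattened list.  No per-key counters, no fused nested loop.
--     level = [adl_dataset]
--     counts = []
--     for _ in range(3):
--         level = [v for d in level for v in d.values()]
--         counts.append(len(level))
--     level = [song for lst in level for song in lst]
--     counts.append(len(level))
--     return {"Artists": counts[2], "Genres": counts[0],
--             "Sub-Genres": counts[1], "Songs": counts[3]}
-- ===== Notes on version B (the rewrite author's own statement) =====
-- stated objective: alternative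
-- what changed: Replaces A's single fused four-deep nested loop mutating a counter dict by iterative level-by-level flattening (BFS): each pass flattens one nesting level into a flat list and the count at each depth is simply that list's length.
import Mathlib
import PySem

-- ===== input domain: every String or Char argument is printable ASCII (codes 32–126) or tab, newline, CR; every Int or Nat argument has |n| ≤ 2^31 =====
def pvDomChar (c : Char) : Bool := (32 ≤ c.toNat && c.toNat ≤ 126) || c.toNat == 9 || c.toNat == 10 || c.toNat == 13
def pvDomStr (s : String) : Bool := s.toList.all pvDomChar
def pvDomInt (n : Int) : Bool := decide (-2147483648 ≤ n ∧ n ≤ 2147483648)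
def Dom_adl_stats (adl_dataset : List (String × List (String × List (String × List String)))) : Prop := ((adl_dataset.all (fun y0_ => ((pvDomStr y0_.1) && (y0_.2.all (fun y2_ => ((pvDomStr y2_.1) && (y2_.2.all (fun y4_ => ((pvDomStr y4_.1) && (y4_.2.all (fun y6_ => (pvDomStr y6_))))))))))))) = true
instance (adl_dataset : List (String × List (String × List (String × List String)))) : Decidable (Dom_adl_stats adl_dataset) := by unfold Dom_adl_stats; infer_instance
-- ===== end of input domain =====

-- B replaces A's fused four-deep counting loop over a mutable counter dict by iterative
-- level-by-level flattening (BFS): each pass flattens one nesting level and the count at each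
-- depth is the length of the flattened list; objective: alternative decomposition.

-- ===== PORT A =====
-- A iterates the dict's keys and looks each key up (adl_dataset[genre], …): ported as a fold over
-- the pairs using PySem.Dict.getD on the corresponding association list, mutating a counter Dict.
def adl_stats (adl_dataset : List (String × List (String × List (String × List String)))) : List (String × Int) :=
  (adl_dataset.foldl (fun st g =>
      (PySem.Dict.getD (PySem.Dict.mk adl_dataset) g.1 []).foldl (fun st s =>
          (PySem.Dict.getD (PySem.Dict.mk (PySem.Dict.getD (PySem.Dict.mk adl_dataset) g.1 [])) s.1 []).foldl (fun st a =>
              (PySem.Dict.getD (PySem.Dict.mk (PySem.Dict.getD (PySem.Dict.mk (PySem.Dict.getD (PySem.Dict.mk adl_dataset) g.1 [])) s.1 [])) a.1 []).foldl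
                (fun st _ => st.modify "Songs" 0 (· + 1))
                (st.modify "Artists" 0 (· + 1)))
            (st.modify "Sub-Genres" 0 (· + 1)))
        (st.modify "Genres" 0 (· + 1)))
    (PySem.Dict.ofList [("Artists", 0), ("Genres", 0), ("Sub-Genres", 0), ("Songs", 0)])).items

-- ===== PORT B =====
-- Source B's loop runs over lists whose element TYPE changes each iteration (dicts of decreasing
-- depth), so the three dict-flattening passes are unrolled here; each pass is the same
-- comprehension '[v for d in level for v in d.values()]' (flatMap of .values = map Prod.snd),
-- followed by the final song-list flattening pass, counts taken as lengths.
def adl_stats_alt (adl_dataset : List (String × List (String × List (String × List String)))) : List (String × Int) :=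
  let l1 := [adl_dataset].flatMap (fun d => d.map Prod.snd)
  let l2 := l1.flatMap (fun d => d.map Prod.snd)
  let l3 := l2.flatMap (fun d => d.map Prod.snd)
  let l4 := l3.flatMap (fun lst => lst)
  [("Artists", (l3.length : Int)), ("Genres", (l1.length : Int)),
   ("Sub-Genres", (l2.length : Int)), ("Songs", (l4.length : Int))]

-- ===== PRECONDITION & SPEC =====
-- Pre_ requires distinct keys at every dict level: a Python dict cannot hold duplicate keys, so
-- association lists with duplicates correspond to no Python input; on them A's port's
-- first-match lookup and B's direct flattening would differ.
def Pre_adl_stats (adl_dataset : List (String × List (String × List (String × List String)))) : Prop :=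
  (adl_dataset.map Prod.fst).Nodup ∧
  ∀ g ∈ adl_dataset, (g.2.map Prod.fst).Nodup ∧
    ∀ s ∈ g.2, (s.2.map Prod.fst).Nodup
instance (adl_dataset : List (String × List (String × List (String × List String)))) : Decidable (Pre_adl_stats adl_dataset) := by unfold Pre_adl_stats; infer_instance

def pvWitness_adl_stats : (List (String × List (String × List (String × List String)))) :=
  [("Classical", [("Baroque", [("Bach", ["Air", "Badinerie"])])])]

def Spec_adl_stats (adl_dataset : List (String × List (String × List (String × List String)))) (out : List (String × Int)) : Prop := out = adl_stats_alt adl_dataset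
instance (adl_dataset : List (String × List (String × List (String × List String)))) (out : List (String × Int)) : Decidable (Spec_adl_stats adl_dataset out) := by unfold Spec_adl_stats; infer_instance

-- ===== CLAIM (what is proved, stated in full; the proofs are below) =====
def Claim_equal_adl_stats : Prop := ∀ (adl_dataset : List (String × List (String × List (String × List String)))), Dom_adl_stats adl_dataset → Pre_adl_stats adl_dataset → Spec_adl_stats adl_dataset (adl_stats adl_dataset)

-- ===== LEMMAS AND PROOFS =====

-- the counter dict of A, as a function of its four counts
def pvMk4 (a g s n : Int) : PySem.Dict String Int :=
  PySem.Dict.mk [("Artists", a), ("Genres", g), ("Sub-Genres", s), ("Songs", n)]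

theorem pvMk4_songs (a g s n : Int) :
    (pvMk4 a g s n).modify "Songs" 0 (· + 1) = pvMk4 a g s (n + 1) := by
  simp [pvMk4, PySem.Dict.modify]; rfl

theorem pvMk4_artists (a g s n : Int) :
    (pvMk4 a g s n).modify "Artists" 0 (· + 1) = pvMk4 (a + 1) g s n := by
  simp [pvMk4, PySem.Dict.modify]; rfl

theorem pvMk4_sub (a g s n : Int) :
    (pvMk4 a g s n).modify "Sub-Genres" 0 (· + 1) = pvMk4 a g (s + 1) n := by
  simp [pvMk4, PySem.Dict.modify]; rfl

theorem pvMk4_genres (a g s n : Int) :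
    (pvMk4 a g s n).modify "Genres" 0 (· + 1) = pvMk4 a (g + 1) s n := by
  simp [pvMk4, PySem.Dict.modify]; rfl

-- under Nodup keys, the dict lookup of a member pair's key returns its own value
theorem pvGetD_mk_of_mem {ν : Type} (d : List (String × ν)) (h : (d.map Prod.fst).Nodup)
    (p : String × ν) (hp : p ∈ d) (d0 : ν) :
    PySem.Dict.getD (PySem.Dict.mk d) p.1 d0 = p.2 := by
  apply PySem.Dict.getD_of_mem_items
  · exact hp
  · simpa [PySem.Dict.keys] using h

-- innermost loop: songs
theorem pvL3 (l : List String) (a g s n : Int) :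
    l.foldl (fun st _ => st.modify "Songs" 0 (· + 1)) (pvMk4 a g s n)
      = pvMk4 a g s (n + l.length) := by
  induction l generalizing n with
  | nil => simp
  | cons x xs ih => simp [List.foldl_cons, pvMk4_songs, ih]; ring_nf

-- artist loop, songs drawn directly from each pair (no lookup)
theorem pvL2 (it : List (String × List String)) (a g s n : Int) :
    it.foldl (fun st r =>
        r.2.foldl (fun st _ => st.modify "Songs" 0 (· + 1))
          (st.modify "Artists" 0 (· + 1))) (pvMk4 a g s n)
      = pvMk4 (a + it.length) g s (n + (it.map (fun r => (r.2.length : Int))).sum) := by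
  induction it generalizing a n with
  | nil => simp
  | cons x xs ih => simp [List.foldl_cons, pvMk4_artists, pvL3, ih]; ring_nf

-- subgenre loop
theorem pvL1 (it : List (String × List (String × List String))) (a g s n : Int) :
    it.foldl (fun st q =>
        q.2.foldl (fun st r =>
            r.2.foldl (fun st _ => st.modify "Songs" 0 (· + 1))
              (st.modify "Artists" 0 (· + 1)))
          (st.modify "Sub-Genres" 0 (· + 1))) (pvMk4 a g s n)
      = pvMk4
          (a + (it.map (fun q => (q.2.length : Int))).sum)
          g (s + it.length)
          (n + (it.map (fun q => (q.2.map (fun r => (r.2.length : Int))).sum)).sum) := by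
  induction it generalizing a s n with
  | nil => simp
  | cons x xs ih => simp [List.foldl_cons, pvMk4_sub, pvL2, ih]; ring_nf

-- genre loop
theorem pvL0 (it : List (String × List (String × List (String × List String)))) (a g s n : Int) :
    it.foldl (fun st p =>
        p.2.foldl (fun st q =>
            q.2.foldl (fun st r =>
                r.2.foldl (fun st _ => st.modify "Songs" 0 (· + 1))
                  (st.modify "Artists" 0 (· + 1)))
              (st.modify "Sub-Genres" 0 (· + 1)))
          (st.modify "Genres" 0 (· + 1))) (pvMk4 a g s n)
      = pvMk4
          (a + (it.map (fun p => (p.2.map (fun q => (q.2.length : Int))).sum)).sum)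
          (g + it.length)
          (s + (it.map (fun p => (p.2.length : Int))).sum)
          (n + (it.map (fun p =>
            (p.2.map (fun q => (q.2.map (fun r => (r.2.length : Int))).sum)).sum)).sum) := by
  induction it generalizing a g s n with
  | nil => simp
  | cons x xs ih => simp [List.foldl_cons, pvMk4_genres, pvL1, ih]; ring_nf

theorem pvInit :
    PySem.Dict.ofList ([("Artists", 0), ("Genres", 0), ("Sub-Genres", 0), ("Songs", 0)] : List (String × Int))
      = pvMk4 0 0 0 0 := by decide

-- under Pre_, A's lookup-based fold is the direct fold over the pairs themselves
theorem pvA_eq_direct (d : List (String × List (String × List (String × List String))))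
    (hpre : Pre_adl_stats d) :
    adl_stats d
      = (d.foldl (fun st p =>
          p.2.foldl (fun st q =>
              q.2.foldl (fun st r =>
                  r.2.foldl (fun st _ => st.modify "Songs" 0 (· + 1))
                    (st.modify "Artists" 0 (· + 1)))
                (st.modify "Sub-Genres" 0 (· + 1)))
            (st.modify "Genres" 0 (· + 1)))
          (pvMk4 0 0 0 0)).items := by
  obtain ⟨h0, h1⟩ := hpre
  rw [adl_stats, pvInit]
  congr 1
  apply PySem.List.foldl_congr_mem
  intro st p hp
  simp only [pvGetD_mk_of_mem d h0 p hp]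
  apply PySem.List.foldl_congr_mem
  intro st' q hq
  simp only [pvGetD_mk_of_mem p.2 (h1 p hp).1 q hq]
  apply PySem.List.foldl_congr_mem
  intro st'' r hr
  simp only [pvGetD_mk_of_mem q.2 ((h1 p hp).2 q hq) r hr]

-- lengths of the successive flattened levels, as the nested Int sums A accumulates
theorem pvG1 {A B : Type} (L : List (A × List B)) :
    (((L.map Prod.snd).flatMap (fun l => l)).length : Int)
      = (L.map (fun p => (p.2.length : Int))).sum := by
  induction L with
  | nil => simp
  | cons x xs _ => simp [Function.comp_def]

theorem pvG1' {A B C : Type} (L : List (A × List (B × C))) :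
    (((L.map Prod.snd).flatMap (fun x => x.map Prod.snd)).length : Int)
      = (L.map (fun p => (p.2.length : Int))).sum := by
  induction L with
  | nil => simp
  | cons x xs _ => simp [Function.comp_def]

theorem pvG2 {A B C D : Type} (L : List (A × List (B × List (C × D)))) :
    ((((L.map Prod.snd).flatMap (fun x => x.map Prod.snd)).flatMap (fun x => x.map Prod.snd)).length : Int)
      = (L.map (fun p => (p.2.map (fun q => (q.2.length : Int))).sum)).sum := by
  induction L with
  | nil => simp
  | cons x xs ih =>
    simp only [List.map_cons, List.flatMap_cons, List.flatMap_append, List.length_append,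
      Nat.cast_add, List.sum_cons, pvG1' x.2, ih]

theorem pvG2' {A B E : Type} (L : List (A × List (B × List E))) :
    ((((L.map Prod.snd).flatMap (fun x => x.map Prod.snd)).flatMap (fun l => l)).length : Int)
      = (L.map (fun p => (p.2.map (fun q => (q.2.length : Int))).sum)).sum := by
  induction L with
  | nil => simp
  | cons x xs ih =>
    simp only [List.map_cons, List.flatMap_cons, List.flatMap_append, List.length_append,
      Nat.cast_add, List.sum_cons, pvG1 x.2, ih]

theorem pvG3 {A B C E : Type} (L : List (A × List (B × List (C × List E)))) :
    (((((L.map Prod.snd).flatMap (fun x => x.map Prod.snd)).flatMap (fun x => x.map Prod.snd)).flatMap (fun l => l)).length : Int)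
      = (L.map (fun p => (p.2.map (fun q => (q.2.map (fun r => (r.2.length : Int))).sum)).sum)).sum := by
  induction L with
  | nil => simp
  | cons x xs ih =>
    simp only [List.map_cons, List.flatMap_cons, List.flatMap_append, List.length_append,
      Nat.cast_add, List.sum_cons, pvG2' x.2, ih]

theorem pvItems (a g s n : Int) :
    (pvMk4 a g s n).items = [("Artists", a), ("Genres", g), ("Sub-Genres", s), ("Songs", n)] := rfl

-- ===== VERDICT (by name: the statement is the Claim_ definition above) =====
theorem adl_stats_spec : Claim_equal_adl_stats := by
  intro d _ hpre
  show adl_stats d = adl_stats_alt d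
  rw [pvA_eq_direct d hpre, pvL0 d 0 0 0 0, pvItems]
  simp only [adl_stats_alt, List.flatMap_cons, List.flatMap_nil, List.append_nil, zero_add,
    List.cons.injEq, Prod.mk.injEq, and_true, true_and]
  refine ⟨(pvG2 d).symm, ?_, (pvG1' d).symm, (pvG3 d).symm⟩
  simp
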